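-- pv_equiv track=rewrite | github.com/sandeep231004/Multimodal-and-Agentic-RAG | DataExtraction/ExtractionUtils_improved.py | is_likely_table
-- ===== SOURCE A (Python) =====
-- def is_likely_table(text):
--     """Detect if text likely represents tabular data."""
--     text_lower = text.lower()
--
--     # Check for common table indicators
--     if ('|' in text and ('-' * 3) in text):
--         return True
--     elif text.count('\t') > 3:
--         return True
--     elif any(text.count(sep) > 3 for sep in [',', '\t', '|', ';']):
--         return True
--     elif text.count('\n') > 3 and len(set([line.count(':') for line in text.split('\n') if line.strip()])) <= 2:
--         return True
--     return False
-- ===== SOURCE B (Python) =====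
-- def is_likely_table(text):
--     """Detect if text likely represents tabular data."""
--     # Single streaming pass: counters, a dash-run tracker for '---',
--     # and per-line colon/non-blank accumulators reset at each newline.
--     tab = comma = pipe = semi = nl = 0
--     dash_run = 0
--     has_dashes = False
--     cur_colons = 0
--     cur_nonblank = False
--     colon_counts = set()
--     for ch in text:
--         if ch == '-':
--             dash_run += 1
--             if dash_run == 3:
--                 has_dashes = True
--         else:
--             dash_run = 0
--         if ch == '\t':
--             tab += 1
--         elif ch == ',':
--             comma += 1
--         elif ch == '|':
--             pipe += 1
--         elif ch == ';':
--             semi += 1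
--         if ch == '\n':
--             nl += 1
--             if cur_nonblank:
--                 colon_counts.add(cur_colons)
--             cur_colons = 0
--             cur_nonblank = False
--         else:
--             if ch == ':':
--                 cur_colons += 1
--             if not ch.isspace():
--                 cur_nonblank = True
--     if cur_nonblank:
--         colon_counts.add(cur_colons)
--     return ((pipe > 0 and has_dashes)
--             or tab > 3 or comma > 3 or pipe > 3 or semi > 3
--             or (nl > 3 and len(colon_counts) <= 2))
-- ===== Notes on version B (the rewrite author's own statement) =====
-- stated objective: alternative
-- what changed: B is a single streaming pass over the characters (a small state machine): separator counters, a dash-run counter that detects the dash table rule without a substring search, and per-line colon/non-blank accumulators reset at each newline that build the colon-count set without splitting the text into lines, replacing A's chain of str.count scans, its substring membership test and its split-based comprehension.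
import Mathlib
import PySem

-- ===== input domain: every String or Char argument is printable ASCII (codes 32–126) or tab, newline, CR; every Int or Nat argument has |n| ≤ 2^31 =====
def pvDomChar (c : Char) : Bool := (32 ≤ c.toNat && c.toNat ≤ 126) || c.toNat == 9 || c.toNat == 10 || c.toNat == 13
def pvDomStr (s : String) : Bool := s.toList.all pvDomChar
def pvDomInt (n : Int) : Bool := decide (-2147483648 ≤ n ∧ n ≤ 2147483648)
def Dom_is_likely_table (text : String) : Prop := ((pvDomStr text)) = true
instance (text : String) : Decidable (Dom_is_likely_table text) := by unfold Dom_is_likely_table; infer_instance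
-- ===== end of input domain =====

-- B replaces A's chain of str.count scans, the '---' substring test and the split('\n')
-- comprehension by ONE streaming pass: a state machine with separator counters, a dash-run
-- counter detecting '---', and per-line colon/non-blank accumulators reset at each newline
-- (objective: alternative).


-- ===== PORT A =====
def is_likely_table (text : String) : Bool :=
  let _text_lower := PySem.Chars.lower text.toList   -- A computes text.lower() and never uses it
  if PySem.Chars.isIn ['|'] text.toList && PySem.Chars.isIn ['-','-','-'] text.toList then true
  else if PySem.Chars.count text.toList ['\t'] > 3 then true
  else if [',', '\t', '|', ';'].any (fun sep => PySem.Chars.count text.toList [sep] > 3) then true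
  else if PySem.Chars.count text.toList ['\n'] > 3 &&
      PySem.Set.len (PySem.Set.ofList
        (((PySem.Chars.splitOn text.toList ['\n']).filter
            (fun line => !(PySem.Chars.strip line).isEmpty)).map
          (fun line => PySem.Chars.count line [':']))) ≤ 2 then true
  else false

-- ===== PORT B =====
-- the three groups of per-character state updates of Source B's loop body
def pvCountStep (st : Nat × Nat × Nat × Nat) (ch : Char) : Nat × Nat × Nat × Nat :=
  match st with
  | (tab, comma, pipe, semi) =>
    if ch = '\t' then (tab + 1, comma, pipe, semi)
    else if ch = ',' then (tab, comma + 1, pipe, semi)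
    else if ch = '|' then (tab, comma, pipe + 1, semi)
    else if ch = ';' then (tab, comma, pipe, semi + 1)
    else (tab, comma, pipe, semi)

def pvDashStep (st : Nat × Bool) (ch : Char) : Nat × Bool :=
  match st with
  | (run, flag) =>
    if ch = '-' then (run + 1, if run + 1 = 3 then true else flag)
    else (0, flag)

def pvLineStep (st : Nat × Nat × Bool × PySem.Set Nat) (ch : Char) : Nat × Nat × Bool × PySem.Set Nat :=
  match st with
  | (nl, cc, nb, s) =>
    if ch = '\n' then (nl + 1, 0, false, if nb then PySem.Set.add s cc else s)
    else (nl, cc + (if ch = ':' then 1 else 0), nb || !PySem.Chars.isspace ch, s)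

def is_likely_table_alt (text : String) : Bool :=
  let st := text.toList.foldl
    (fun st ch => (pvCountStep st.1 ch, (pvDashStep st.2.1 ch, pvLineStep st.2.2 ch)))
    ((0, 0, 0, 0), ((0, false), (0, 0, false, PySem.Set.empty)))
  let tab := st.1.1
  let comma := st.1.2.1
  let pipe := st.1.2.2.1
  let semi := st.1.2.2.2
  let has_dashes := st.2.1.2
  let nl := st.2.2.1
  let cur_colons := st.2.2.2.1
  let cur_nonblank := st.2.2.2.2.1
  let colon_counts := if cur_nonblank then PySem.Set.add st.2.2.2.2.2 cur_colons else st.2.2.2.2.2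
  (decide (0 < pipe) && has_dashes) || decide (3 < tab) || decide (3 < comma)
    || decide (3 < pipe) || decide (3 < semi)
    || (decide (3 < nl) && decide (PySem.Set.len colon_counts ≤ 2))

-- ===== PRECONDITION & SPEC =====
def Spec_is_likely_table (text : String) (out : Bool) : Prop := out = is_likely_table_alt text
instance (text : String) (out : Bool) : Decidable (Spec_is_likely_table text out) := by unfold Spec_is_likely_table; infer_instance

-- ===== CLAIM (what is proved, stated in full; the proofs are below) =====
def Claim_equal_is_likely_table : Prop := ∀ (text : String), Dom_is_likely_table text → Spec_is_likely_table text (is_likely_table text)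

-- ===== LEMMAS AND PROOFS =====

-- single-character substring count is the list count of that character
theorem chars_count_go_single (c : Char) (l : List Char) (fuel : Nat) (acc : Nat)
    (h : l.length ≤ fuel) :
    PySem.Chars.count.go [c] fuel l acc = acc + l.count c := by
  induction l generalizing fuel acc with
  | nil => cases fuel <;> simp [PySem.Chars.count.go]
  | cons x t ih =>
      cases fuel with
      | zero => simp at h
      | succ m =>
          simp only [List.length_cons, Nat.succ_le_succ_iff] at h
          by_cases hx : c = x
          · subst hx
            simp [PySem.Chars.count.go, List.isPrefixOf, ih _ _ h]
            omega
          · have hbeq : (c == x) = false := by simp [hx]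
            simp [PySem.Chars.count.go, List.isPrefixOf, hbeq, ih _ _ h, Ne.symm hx]

theorem chars_count_single (c : Char) (l : List Char) :
    PySem.Chars.count l [c] = l.count c := by
  simpa [PySem.Chars.count] using chars_count_go_single c l l.length 0 le_rfl

-- 'sub in s' as a decide, to move between the Bool test and the infix proposition
theorem isIn_eq_decide (sub l : List Char) :
    PySem.Chars.isIn sub l = decide (sub <:+: l) := by
  by_cases h : sub <:+: l
  · simp [h, (PySem.Chars.isIn_iff_infix sub l).2 h]
  · simp [h, (PySem.Chars.isIn_eq_false_iff sub l).2 h]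

-- '|' in text holds exactly when the character count is positive
theorem isIn_single_iff_count_pos (c : Char) (l : List Char) :
    PySem.Chars.isIn [c] l = decide (0 < l.count c) := by
  rw [isIn_eq_decide]
  by_cases h : c ∈ l
  · simp [(List.singleton_infix_iff c l).2 h, List.count_pos_iff.2 h]
  · have hni : ¬ [c] <:+: l := fun hinf => h ((List.singleton_infix_iff c l).1 hinf)
    simp [hni, List.count_eq_zero_of_not_mem h]

-- a line survives strip iff it has a non-whitespace character
theorem strip_isEmpty (l : List Char) :
    (PySem.Chars.strip l).isEmpty = l.all PySem.Chars.isspace := by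
  rw [Bool.eq_iff_iff]
  simp only [List.isEmpty_iff, PySem.Chars.strip, PySem.Chars.rstrip, PySem.Chars.lstrip,
    List.reverse_eq_nil_iff, List.dropWhile_eq_nil_iff, List.mem_reverse, List.all_eq_true]
  constructor
  · intro h x hx
    rcases List.mem_append.1
        (by rw [List.takeWhile_append_dropWhile
          (p := PySem.Chars.isspace) (l := l)]; exact hx) with h1 | h2
    · exact List.mem_takeWhile_imp h1
    · exact h x h2
  · intro h x hx
    exact h x ((List.dropWhile_sublist _).subset hx)

-- mapHead and pvSplitNL: a direct structural model of text.split('\n')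
def pvMapHead (f : List Char → List Char) : List (List Char) → List (List Char)
  | [] => []
  | h :: t => f h :: t

def pvSplitNL : List Char → List (List Char)
  | [] => [[]]
  | c :: t => if c = '\n' then [] :: pvSplitNL t else pvMapHead (fun m => c :: m) (pvSplitNL t)

theorem pvSplitNL_ne_nil (l : List Char) : pvSplitNL l ≠ [] := by
  induction l with
  | nil => simp [pvSplitNL]
  | cons c t ih =>
      by_cases hc : c = '\n'
      · simp [pvSplitNL, hc]
      · cases hs : pvSplitNL t with
        | nil => exact absurd hs ih
        | cons h r => simp [pvSplitNL, hc, hs, pvMapHead]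

theorem pvMapHead_id (xs : List (List Char)) : pvMapHead (fun m => m) xs = xs := by
  cases xs <;> simp [pvMapHead]

theorem splitOn_go_newline (l : List Char) (fuel : Nat) (cur : List Char)
    (acc : List (List Char)) (h : l.length < fuel) :
    PySem.Chars.splitOn.go ['\n'] fuel l cur acc
      = acc.reverse ++ pvMapHead (fun m => cur.reverse ++ m) (pvSplitNL l) := by
  induction l generalizing fuel cur acc with
  | nil =>
      cases fuel with
      | zero => omega
      | succ m => simp [PySem.Chars.splitOn.go, pvSplitNL, pvMapHead]
  | cons c t ih =>
      cases fuel with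
      | zero => omega
      | succ m =>
          have hm : t.length < m := by simpa using h
          by_cases hc : c = '\n'
          · subst hc
            rw [show PySem.Chars.splitOn.go ['\n'] (m+1) ('\n' :: t) cur acc
                  = PySem.Chars.splitOn.go ['\n'] m t [] (cur.reverse :: acc) by
                simp [PySem.Chars.splitOn.go, List.isPrefixOf]]
            rw [ih m [] (cur.reverse :: acc) hm]
            cases hs : pvSplitNL t with
            | nil => exact absurd hs (pvSplitNL_ne_nil t)
            | cons a b => simp [pvSplitNL, pvMapHead, hs]
          · have hbeq : ('\n' == c) = false := by simp [Ne.symm hc]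
            rw [show PySem.Chars.splitOn.go ['\n'] (m+1) (c :: t) cur acc
                  = PySem.Chars.splitOn.go ['\n'] m t (c :: cur) acc by
                simp [PySem.Chars.splitOn.go, List.isPrefixOf, hbeq]]
            rw [ih m (c :: cur) acc hm]
            cases hs : pvSplitNL t with
            | nil => exact absurd hs (pvSplitNL_ne_nil t)
            | cons a b => simp [pvSplitNL, pvMapHead, hc, hs]

theorem splitOn_newline (l : List Char) :
    PySem.Chars.splitOn l ['\n'] = pvSplitNL l := by
  rw [PySem.Chars.splitOn, splitOn_go_newline l (l.length + 1) [] [] (by omega)]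
  simp [pvMapHead_id]

-- the four separator counters of B's loop
theorem countFold (l : List Char) (t cm p s : Nat) :
    l.foldl pvCountStep (t, cm, p, s)
      = (t + l.count '\t', cm + l.count ',', p + l.count '|', s + l.count ';') := by
  induction l generalizing t cm p s with
  | nil => simp
  | cons c r ih =>
      simp only [List.foldl_cons, pvCountStep]
      split_ifs with h1 h2 h3 h4 <;>
        first
        | (subst h1; rw [ih]; simp [List.count_cons]; omega)
        | (subst h2; rw [ih]; simp [List.count_cons, h1]; omega)
        | (subst h3; rw [ih]; simp [List.count_cons, h1, h2]; omega)
        | (subst h4; rw [ih]; simp [List.count_cons, h1, h2, h3]; omega)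
        | (rw [ih]; simp [List.count_cons, h1, h2, h3, h4, Ne.symm])

-- what the dash-run tracker will still report on the rest of the text
def pvDashB (run : Nat) (l : List Char) : Bool :=
  decide (['-','-','-'] <:+: l) || (decide (2 ≤ run) && decide (['-'] <+: l))
    || (decide (run = 1) && decide (['-','-'] <+: l))

theorem dashFold (l : List Char) (run : Nat) (flag : Bool) (h : 3 ≤ run → flag = true) :
    (l.foldl pvDashStep (run, flag)).2 = (flag || pvDashB run l) := by
  induction l generalizing run flag with
  | nil => simp [pvDashB]
  | cons c t ih =>
      by_cases hc : c = '-'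
      · subst hc
        rw [List.foldl_cons,
          show pvDashStep (run, flag) '-' = (run + 1, if run + 1 = 3 then true else flag) from by
            simp [pvDashStep]]
        rw [ih (run + 1) _ (by
          intro h3
          rcases eq_or_ne (run + 1) 3 with he | he
          · simp [he]
          · simp [he]; exact h (by omega))]
        cases hf : flag with
        | true => simp
        | false =>
            have hr : run ≤ 2 := by
              by_contra hx
              have := h (by omega)
              simp [hf] at this
            have himp : (['-','-'] <+: t) → (['-'] <+: t) :=
              fun hp => List.IsPrefix.trans (by decide) hp
            interval_cases run <;>
              (rw [Bool.eq_iff_iff] <;>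
               simp [pvDashB, List.infix_cons_iff, List.cons_prefix_cons] <;> tauto)
      · rw [List.foldl_cons,
          show pvDashStep (run, flag) c = (0, flag) from by simp [pvDashStep, hc]]
        rw [ih 0 flag (by omega)]
        have : pvDashB run (c :: t) = pvDashB 0 t := by
          rw [Bool.eq_iff_iff]
          simp [pvDashB, List.infix_cons_iff, List.cons_prefix_cons, Ne.symm hc]
        rw [this]

-- the colon counts of the non-blank lines, seeded with the current line's partial state
def pvColonList (cc : Nat) (nb : Bool) : List Char → List Nat
  | [] => if nb then [cc] else []
  | c :: t =>
      if c = '\n' then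
        (if nb then cc :: pvColonList 0 false t else pvColonList 0 false t)
      else pvColonList (cc + (if c = ':' then 1 else 0)) (nb || !PySem.Chars.isspace c) t

theorem lineFold (l : List Char) (nl cc : Nat) (nb : Bool) (s : PySem.Set Nat) :
    (l.foldl pvLineStep (nl, cc, nb, s)).1 = nl + l.count '\n'
    ∧ (if (l.foldl pvLineStep (nl, cc, nb, s)).2.2.1 then
        PySem.Set.add (l.foldl pvLineStep (nl, cc, nb, s)).2.2.2
          (l.foldl pvLineStep (nl, cc, nb, s)).2.1
       else (l.foldl pvLineStep (nl, cc, nb, s)).2.2.2)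
        = List.foldl PySem.Set.add s (pvColonList cc nb l) := by
  induction l generalizing nl cc nb s with
  | nil => constructor <;> simp [pvColonList] <;> split_ifs <;> rfl
  | cons c t ih =>
      by_cases hc : c = '\n'
      · subst hc
        rw [List.foldl_cons,
          show pvLineStep (nl, cc, nb, s) '\n'
              = (nl + 1, 0, false, if nb then PySem.Set.add s cc else s) from by
            simp [pvLineStep]]
        refine ⟨?_, ?_⟩
        · rw [(ih (nl+1) 0 false _).1]; simp [List.count_cons]; omega
        · rw [(ih (nl+1) 0 false _).2]
          by_cases hnb : nb <;> simp [pvColonList, hnb]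
      · rw [List.foldl_cons,
          show pvLineStep (nl, cc, nb, s) c
              = (nl, cc + (if c = ':' then 1 else 0), nb || !PySem.Chars.isspace c, s) from by
            simp [pvLineStep, hc]]
        refine ⟨?_, ?_⟩
        · rw [(ih nl _ _ s).1]; simp [List.count_cons, hc]
        · rw [(ih nl _ _ s).2]; simp [pvColonList, hc]

theorem colonList_spec (l : List Char) (cc : Nat) (nb : Bool) (h : List Char)
    (t : List (List Char)) (hs : pvSplitNL l = h :: t) :
    pvColonList cc nb l
      = (if nb || h.any (fun c => !PySem.Chars.isspace c) then [cc + h.count ':'] else [])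
        ++ (t.filter (fun m => m.any (fun c => !PySem.Chars.isspace c))).map
            (fun m => m.count ':') := by
  induction l generalizing cc nb h t with
  | nil =>
      simp only [pvSplitNL] at hs
      injection hs with h1 h2
      subst h1; subst h2
      simp [pvColonList]
  | cons c r ih =>
      by_cases hc : c = '\n'
      · subst hc
        simp only [pvSplitNL, if_pos rfl] at hs
        injection hs with h1 h2
        subst h1; subst h2
        cases hr : pvSplitNL r with
        | nil => exact absurd hr (pvSplitNL_ne_nil r)
        | cons h' t' =>
            simp only [pvColonList, if_pos rfl]
            rw [ih 0 false h' t' hr]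
            by_cases hnb : nb <;>
              by_cases hh : h'.any (fun c => !PySem.Chars.isspace c) <;>
              simp [hnb, hh, hr, List.filter_cons]
      · cases hr : pvSplitNL r with
        | nil => exact absurd hr (pvSplitNL_ne_nil r)
        | cons h' t' =>
            rw [show pvSplitNL (c :: r) = pvMapHead (fun m => c :: m) (pvSplitNL r) from by
                simp [pvSplitNL, hc], hr] at hs
            simp only [pvMapHead] at hs
            injection hs with h1 h2
            subst h1; subst h2
            rw [show pvColonList cc nb (c :: r)
                = pvColonList (cc + (if c = ':' then 1 else 0)) (nb || !PySem.Chars.isspace c) r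
              from by simp [pvColonList, hc]]
            rw [ih _ _ h' t' hr]
            by_cases hcol : c = ':' <;> by_cases hsp : PySem.Chars.isspace c <;>
              simp [hcol, hsp, List.count_cons, List.any_cons, Bool.or_assoc,
                Nat.add_comm, Nat.add_assoc, Nat.add_left_comm]

theorem colonList_zero (l : List Char) :
    pvColonList 0 false l
      = ((pvSplitNL l).filter (fun m => m.any (fun c => !PySem.Chars.isspace c))).map
          (fun m => m.count ':') := by
  cases hr : pvSplitNL l with
  | nil => exact absurd hr (pvSplitNL_ne_nil l)
  | cons h t =>
      rw [colonList_spec l 0 false h t hr]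
      by_cases hh : h.any (fun c => !PySem.Chars.isspace c) <;>
        simp [hh, List.filter_cons]

-- B's loop updates its three state groups independently
theorem tripleFold (l : List Char) (a : Nat × Nat × Nat × Nat) (b : Nat × Bool)
    (c : Nat × Nat × Bool × PySem.Set Nat) :
    l.foldl (fun st ch => (pvCountStep st.1 ch, (pvDashStep st.2.1 ch, pvLineStep st.2.2 ch)))
        (a, (b, c))
      = (l.foldl pvCountStep a, (l.foldl pvDashStep b, l.foldl pvLineStep c)) := by
  induction l generalizing a b c with
  | nil => rfl
  | cons x t ih => simp [List.foldl_cons, ih]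

-- the filter predicate of A's comprehension is 'has a non-whitespace character'
theorem strip_filter_pred :
    (fun line => !(PySem.Chars.strip line).isEmpty)
      = (fun line : List Char => line.any (fun c => !PySem.Chars.isspace c)) := by
  funext line
  rw [strip_isEmpty, Bool.eq_iff_iff]
  simp [List.all_eq_true, List.any_eq_true]

-- A's if-chain equals B's flat disjunction once all quantities agree
theorem chain_eq (np nt nc np2 ns nn : Nat) (sl : Int) (d : Bool) :
  (if (decide (0 < np) && d) = true then true
   else if 3 < nt then true
   else if (decide (3 < nc) || (decide (3 < nt) || (decide (3 < np2) || decide (3 < ns)))) = true then true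
   else if (decide (3 < nn) && decide (sl ≤ 2)) = true then true
   else false)
  = (decide (0 < np) && d || decide (3 < nt) || decide (3 < nc) || decide (3 < np2) || decide (3 < ns) ||
      decide (3 < nn) && decide (sl ≤ 2)) := by
  by_cases h1 : 0 < np <;> by_cases h2 : 3 < nt <;> by_cases h3 : 3 < nc <;>
  by_cases h4 : 3 < np2 <;> by_cases h5 : 3 < ns <;> by_cases h6 : 3 < nn <;>
  by_cases h7 : sl ≤ 2 <;> cases d <;> simp_all [Bool.or_assoc]

theorem is_likely_table_eq (text : String) :
    is_likely_table text = is_likely_table_alt text := by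
  unfold is_likely_table is_likely_table_alt
  rw [tripleFold]
  dsimp only
  rw [countFold]
  dsimp only
  rw [(lineFold text.toList 0 0 false PySem.Set.empty).1,
      (lineFold text.toList 0 0 false PySem.Set.empty).2,
      dashFold text.toList 0 false (by omega)]
  rw [splitOn_newline, strip_filter_pred,
    show (fun line => PySem.Chars.count line [':']) = (fun line : List Char => line.count ':')
      from funext fun line => chars_count_single ':' line,
    ← colonList_zero, PySem.Set.ofList_eq_foldl,
    show ([] : PySem.Set Nat) = PySem.Set.empty from rfl,
    isIn_eq_decide ['-','-','-'] text.toList]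
  simp only [chars_count_single, isIn_single_iff_count_pos,
    List.any_cons, List.any_nil, Bool.or_false, gt_iff_lt, Nat.zero_add, Bool.false_or,
    show pvDashB 0 text.toList = decide (['-','-','-'] <:+: text.toList) from by simp [pvDashB]]
  exact chain_eq (List.count '|' text.toList) (List.count '\t' text.toList)
    (List.count ',' text.toList) (List.count '|' text.toList) (List.count ';' text.toList)
    (List.count '\n' text.toList)
    (List.foldl PySem.Set.add PySem.Set.empty (pvColonList 0 false text.toList)).len
    (decide (['-','-','-'] <:+: text.toList))

-- ===== VERDICT (by name: the statement is the Claim_ definition above) =====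
theorem is_likely_table_spec : Claim_equal_is_likely_table := by
  intro text _
  unfold Spec_is_likely_table
  exact is_likely_table_eq text
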